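-- pv_equiv track=rewrite | github.com/slobbe/advent-of-code | 2025/02/main.py | invalid_ids_1
-- ===== SOURCE A (Python) =====
-- def invalid_ids_1(range_boundaries):
--     (first, last) = range_boundaries
--
--     invalid_ids = []
--     for id in range(first, last + 1):
--         id = str(id)
--         if len(id) % 2 != 0:
--             continue  # invalid IDs must have even number of digits
--
--         sub_id = id[: (len(id) // 2)]
--         if id == (sub_id + sub_id):
--             invalid_ids.append(int(id))
--
--     return invalid_ids
-- ===== SOURCE B (Python) =====
-- def invalid_ids_1(range_boundaries):
--     (first, last) = range_boundaries
--
--     # An id reads as two identical halves exactly when it is x * (10**k + 1)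
--     # for some k >= 1 and some k-digit x; generate those directly, in order.
--     def gen(k):
--         m = 10 ** k + 1
--         if 10 ** (k - 1) * m > last:
--             return []
--         lo = max(10 ** (k - 1), -(-first // m))  # ceil(first / m)
--         hi = min(10 ** k - 1, last // m)
--         return [x * m for x in range(lo, hi + 1)] + gen(k + 1)
--
--     return gen(1)
-- ===== Notes on version B (the rewrite author's own statement) =====
-- stated objective: faster
-- what changed: Instead of scanning every integer in [first, last] and string-testing whether its two halves repeat, B generates the hits directly as x*(10^k+1) for each half-length k and each k-digit x in the admissible interval, so its cost is proportional to the number of results rather than to the width of the range.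
import Mathlib
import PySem

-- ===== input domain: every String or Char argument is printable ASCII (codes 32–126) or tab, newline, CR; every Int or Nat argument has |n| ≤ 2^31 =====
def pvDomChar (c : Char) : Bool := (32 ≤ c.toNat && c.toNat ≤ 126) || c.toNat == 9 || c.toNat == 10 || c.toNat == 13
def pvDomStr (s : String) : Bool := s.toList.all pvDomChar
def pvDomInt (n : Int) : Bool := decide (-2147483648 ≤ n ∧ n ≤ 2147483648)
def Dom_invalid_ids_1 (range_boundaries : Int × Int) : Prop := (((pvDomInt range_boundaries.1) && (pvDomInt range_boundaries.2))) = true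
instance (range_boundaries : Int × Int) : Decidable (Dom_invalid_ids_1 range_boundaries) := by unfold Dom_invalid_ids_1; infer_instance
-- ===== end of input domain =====

-- B generates the repeated-half ids directly as x*(10^k+1) instead of scanning every
-- integer in [first, last] and string-testing it (objective: alternative algorithm).


-- ===== PORT A =====
-- literal transliteration of A: scan range(first, last+1); id = str(id); skip odd length;
-- sub_id = id[:len(id)//2]; if id == sub_id + sub_id append int(id).
-- `int(id)`: id is exactly str of the loop integer and Python's int(str(n)) is n, so the
-- appended value is ported as the loop integer itself (exact).
def invalid_ids_1 (range_boundaries : Int × Int) : List Int :=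
  let first := range_boundaries.1
  let last := range_boundaries.2
  (PySem.List.pyRange first (last + 1) 1).foldl
    (fun invalid_ids id =>
      let idStr : List Char := PySem.Int.toChars id
      if PySem.Int.mod (idStr.length : Int) 2 ≠ 0 then invalid_ids  -- continue
      else
        let sub_id := PySem.List.slice idStr none
          (some (PySem.Int.floordiv (idStr.length : Int) 2))
        if idStr = sub_id ++ sub_id then invalid_ids ++ [id]
        else invalid_ids)
    []

-- ===== PORT B =====
-- helper gen(k) of Source B: emit x*(10^k+1) for every k-digit x whose product lies in range,
-- then recurse on k+1; stop as soon as the smallest candidate of half-length k exceeds last.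
def pvGenHalves (first last : Int) (k : Nat) : List Int :=
  let m : Int := 10 ^ k + 1
  if h : 10 ^ (k - 1) * m > last then []
  else
    let lo := max ((10 : Int) ^ (k - 1)) (-(PySem.Int.floordiv (-first) m))
    let hi := min ((10 : Int) ^ k - 1) (PySem.Int.floordiv last m)
    (PySem.List.pyRange lo (hi + 1) 1).map (fun x => x * m) ++ pvGenHalves first last (k + 1)
termination_by (last + 2 - (10 : Int) ^ k).toNat
decreasing_by
  have hg : 10 ^ (k - 1) * ((10 : Int) ^ k + 1) ≤ last := not_lt.mp h
  have h1 : (10 : Int) ^ k ≤ 10 ^ (k - 1) * (10 ^ k + 1) := by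
    rcases Nat.eq_zero_or_pos k with hk | hk
    · subst hk; norm_num
    · have : (10 : Int) ^ k = 10 ^ (k - 1) * 10 ^ (k - (k - 1)) := by
        rw [← pow_add]; congr 1; omega
      have h2 : (1 : Int) ≤ 10 ^ (k - (k - 1)) := one_le_pow₀ (by norm_num)
      nlinarith [pow_pos (show (0:Int) < 10 by norm_num) (k - 1),
        pow_nonneg (show (0:Int) ≤ 10 by norm_num) k]
  have h3 : (10 : Int) ^ k < 10 ^ (k + 1) := by
    have := pow_lt_pow_right₀ (show (1:Int) < 10 by norm_num) (Nat.lt_succ_self k)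
    simpa using this
  omega

def invalid_ids_1_alt (range_boundaries : Int × Int) : List Int :=
  let first := range_boundaries.1
  let last := range_boundaries.2
  pvGenHalves first last 1

-- ===== PRECONDITION & SPEC =====
def Spec_invalid_ids_1 (range_boundaries : Int × Int) (out : List Int) : Prop := out = invalid_ids_1_alt range_boundaries
instance (range_boundaries : Int × Int) (out : List Int) : Decidable (Spec_invalid_ids_1 range_boundaries out) := by unfold Spec_invalid_ids_1; infer_instance

-- ===== CLAIM (what is proved, stated in full; the proofs are below) =====
def Claim_equal_invalid_ids_1 : Prop := ∀ (range_boundaries : Int × Int), Dom_invalid_ids_1 range_boundaries → Spec_invalid_ids_1 range_boundaries (invalid_ids_1 range_boundaries)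

-- ===== LEMMAS AND PROOFS =====
-- (helper definitions below are used only by the proofs)

-- The decimal digit string of m : Nat, low digit last (what Nat.toDigits 10 computes).
def pvRep (m : Nat) : List Char :=
  if h : m < 10 then [Nat.digitChar m]
  else pvRep (m / 10) ++ [Nat.digitChar (m % 10)]
decreasing_by exact Nat.div_lt_self (by omega) (by norm_num)

-- numeric value of a digit string
def pvVal (cs : List Char) : Nat := cs.foldl (fun a c => 10 * a + (c.toNat - 48)) 0

-- the arithmetic predicate: n = x * (10^k + 1) for some half-length k ≥ lo and k-digit x
def pvQ (lo : Nat) (n : Int) : Prop :=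
  ∃ k x : Nat, lo ≤ k ∧ 1 ≤ k ∧ 10 ^ (k - 1) ≤ x ∧ x < 10 ^ k ∧ n = (x : Int) * (10 ^ k + 1)

-- the Boolean test port A performs on one id
def pvPb (n : Int) : Bool :=
  let idStr : List Char := PySem.Int.toChars n
  decide (¬ (PySem.Int.mod (idStr.length : Int) 2 ≠ 0) ∧
    idStr = PySem.List.slice idStr none (some (PySem.Int.floordiv (idStr.length : Int) 2)) ++
            PySem.List.slice idStr none (some (PySem.Int.floordiv (idStr.length : Int) 2)))

lemma pvToDigitsCore_eq : ∀ f n acc, n < f → Nat.toDigitsCore 10 f n acc = pvRep n ++ acc := by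
  intro f
  induction f with
  | zero => omega
  | succ f ih =>
    intro n acc h
    rw [Nat.toDigitsCore]
    by_cases h10 : n / 10 = 0
    · have hn : n < 10 := by omega
      have : n % 10 = n := Nat.mod_eq_of_lt hn
      simp [h10, pvRep, hn, this]
    · have hn : ¬ n < 10 := by omega
      simp only [h10, if_neg h10]
      rw [ih (n / 10) _ (by omega)]
      conv_rhs => rw [pvRep]
      simp [hn]

lemma pvToChars_nonneg (n : Int) (h : 0 ≤ n) : PySem.Int.toChars n = pvRep n.toNat := by
  unfold PySem.Int.toChars
  rw [if_neg (by omega)]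
  rw [Nat.toDigits, pvToDigitsCore_eq _ _ _ (Nat.lt_succ_self _)]
  simp

lemma pvToChars_neg (n : Int) (h : n < 0) : PySem.Int.toChars n = '-' :: pvRep n.natAbs := by
  unfold PySem.Int.toChars
  rw [if_pos h]
  rw [Nat.toDigits, pvToDigitsCore_eq _ _ _ (Nat.lt_succ_self _)]
  simp

lemma pvVal_foldl (cs : List Char) (a : Nat) :
    cs.foldl (fun a c => 10 * a + (c.toNat - 48)) a = a * 10 ^ cs.length + pvVal cs := by
  induction cs generalizing a with
  | nil => simp [pvVal]
  | cons c cs ih =>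
    simp only [List.foldl_cons, List.length_cons]
    rw [ih]
    have hv : pvVal (c :: cs) = (c.toNat - 48) * 10 ^ cs.length + pvVal cs := by
      rw [pvVal, List.foldl_cons]
      simpa using ih (c.toNat - 48)
    rw [hv]
    ring

lemma pvVal_append (s t : List Char) : pvVal (s ++ t) = pvVal s * 10 ^ t.length + pvVal t := by
  unfold pvVal
  rw [List.foldl_append, pvVal_foldl]
  rfl

lemma pvDigitChar_toNat (d : Nat) (h : d < 10) : (Nat.digitChar d).toNat = 48 + d := by
  interval_cases d <;> rfl

lemma pvRep_val (m : Nat) : pvVal (pvRep m) = m := by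
  rw [pvRep]
  by_cases h : m < 10
  · simp [h, pvVal, pvDigitChar_toNat m h]
  · rw [dif_neg h, pvVal_append, pvRep_val (m / 10)]
    simp [pvVal, pvDigitChar_toNat (m % 10) (by omega)]
    omega
decreasing_by exact Nat.div_lt_self (by omega) (by norm_num)

lemma pvRep_len_pos (m : Nat) : 1 ≤ (pvRep m).length := by
  rw [pvRep]
  split <;> simp

lemma pvRep_digits (m : Nat) (c : Char) (hc : c ∈ pvRep m) : 48 ≤ c.toNat ∧ c.toNat ≤ 57 := by
  rw [pvRep] at hc
  by_cases h : m < 10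
  · rw [dif_pos h] at hc
    simp at hc
    subst hc
    rw [pvDigitChar_toNat m h]; omega
  · rw [dif_neg h] at hc
    rcases List.mem_append.mp hc with h1 | h1
    · exact pvRep_digits (m / 10) c h1
    · simp at h1; subst h1
      rw [pvDigitChar_toNat (m % 10) (by omega)]; omega
decreasing_by exact Nat.div_lt_self (by omega) (by norm_num)

lemma pvRep_bounds (m : Nat) (h : 1 ≤ m) :
    10 ^ ((pvRep m).length - 1) ≤ m ∧ m < 10 ^ (pvRep m).length := by
  rw [pvRep]
  by_cases h10 : m < 10
  · simp [h10]; omega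
  · rw [dif_neg h10]
    have ih := pvRep_bounds (m / 10) (by omega)
    have hl := pvRep_len_pos (m / 10)
    simp only [List.length_append, List.length_cons, List.length_nil]
    constructor
    · calc 10 ^ ((pvRep (m / 10)).length + 1 - 1) = 10 ^ ((pvRep (m/10)).length - 1) * 10 ^ 1 := by
            rw [← pow_add]; congr 1; omega
        _ ≤ (m / 10) * 10 := by nlinarith [ih.1]
        _ ≤ m := by omega
    · calc m < (m / 10 + 1) * 10 := by omega
        _ ≤ 10 ^ (pvRep (m/10)).length * 10 := by nlinarith [ih.2]
        _ = 10 ^ ((pvRep (m/10)).length + 1) := by ring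
decreasing_by exact Nat.div_lt_self (by omega) (by norm_num)

lemma pvVal_lt (cs : List Char) (h : ∀ c ∈ cs, c.toNat ≤ 57) : pvVal cs < 10 ^ cs.length := by
  induction cs with
  | nil => simp [pvVal]
  | cons c cs ih =>
    rw [show (c :: cs) = [c] ++ cs from rfl, pvVal_append]
    have h1 : pvVal [c] ≤ 9 := by
      have := h c (by simp)
      simp [pvVal]; omega
    have h2 := ih (fun c hc => h c (by simp [hc]))
    simp only [List.length_append, List.length_cons, List.length_nil]
    calc pvVal [c] * 10 ^ cs.length + pvVal cs < pvVal [c] * 10 ^ cs.length + 10 ^ cs.length := by omega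
      _ ≤ 10 * 10 ^ cs.length := by nlinarith
      _ = 10 ^ (1 + cs.length) := by ring
      _ = 10 ^ (0 + 1 + cs.length) := by norm_num

lemma pvRep_concat (k a b : Nat) (ha : 1 ≤ a) (hk : 1 ≤ k)
    (hb1 : 10 ^ (k - 1) ≤ b) (hb2 : b < 10 ^ k) :
    pvRep (a * 10 ^ k + b) = pvRep a ++ pvRep b := by
  induction k generalizing b with
  | zero => omega
  | succ k ih =>
    rcases Nat.eq_zero_or_pos k with hk0 | hk0
    · subst hk0
      have hb2' : b < 10 := by simpa using hb2
      have h1 : ¬ (a * 10 ^ 1 + b < 10) := by rw [pow_one]; nlinarith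
      conv_lhs => rw [pvRep]
      rw [dif_neg h1]
      have h2 : (a * 10 ^ 1 + b) / 10 = a := by rw [pow_one]; omega
      have h3 : (a * 10 ^ 1 + b) % 10 = b := by rw [pow_one]; omega
      rw [h2, h3]
      congr 1
      rw [pvRep, dif_pos hb2']
    · -- k ≥ 1
      have hb10 : 10 ≤ b := by
        calc 10 = 10 ^ 1 := by norm_num
          _ ≤ 10 ^ (k + 1 - 1) := Nat.pow_le_pow_right (by norm_num) (by omega)
          _ ≤ b := hb1
      have h1 : ¬ (a * 10 ^ (k + 1) + b < 10) := by
        have : 1 * 10 ^ (k+1) ≤ a * 10 ^ (k+1) := Nat.mul_le_mul_right _ ha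
        have : 10 ≤ 10 ^ (k+1) := by
          calc 10 = 10 ^ 1 := by norm_num
            _ ≤ 10 ^ (k+1) := Nat.pow_le_pow_right (by norm_num) (by omega)
        omega
      conv_lhs => rw [pvRep]
      rw [dif_neg h1]
      have h2 : (a * 10 ^ (k + 1) + b) / 10 = a * 10 ^ k + b / 10 := by
        rw [pow_succ, show a * (10 ^ k * 10) + b = b + (a * 10 ^ k) * 10 by ring,
          Nat.add_mul_div_right _ _ (by norm_num : (0:Nat) < 10), Nat.add_comm]
      have h3 : (a * 10 ^ (k + 1) + b) % 10 = b % 10 := by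
        rw [pow_succ, show a * (10 ^ k * 10) + b = b + (a * 10 ^ k) * 10 by ring,
          Nat.add_mul_mod_self_right]
      rw [h2, h3]
      have hdb1 : 10 ^ (k - 1) ≤ b / 10 := by
        have : 10 ^ (k + 1 - 1) = 10 ^ (k - 1) * 10 := by
          rw [← pow_succ]; congr 1; omega
        omega
      have hdb2 : b / 10 < 10 ^ k := by
        have : 10 ^ (k + 1) = 10 ^ k * 10 := by rw [← pow_succ]
        omega
      rw [ih (b / 10) hk0 hdb1 hdb2]
      rw [List.append_assoc]
      congr 1
      conv_rhs => rw [pvRep]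
      rw [dif_neg (by omega : ¬ b < 10)]

lemma pvRep_len_eq (x k : Nat) (hk : 1 ≤ k) (h1 : 10 ^ (k - 1) ≤ x) (h2 : x < 10 ^ k) :
    (pvRep x).length = k := by
  have hx : 1 ≤ x := le_trans (Nat.one_le_pow _ _ (by norm_num)) h1
  have hb := pvRep_bounds x hx
  have hl := pvRep_len_pos x
  set L := (pvRep x).length with hL
  by_contra hne
  rcases Nat.lt_or_ge L k with h | h
  · have : 10 ^ L ≤ 10 ^ (k - 1) := Nat.pow_le_pow_right (by norm_num) (by omega)
    omega
  · have : 10 ^ k ≤ 10 ^ (L - 1) := Nat.pow_le_pow_right (by norm_num) (by omega)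
    omega

lemma pvMin_mono (k k' : Nat) (h : k ≤ k') :
    (10 : Int) ^ (k - 1) * (10 ^ k + 1) ≤ 10 ^ (k' - 1) * (10 ^ k' + 1) := by
  have h1 : (10 : Int) ^ (k - 1) ≤ 10 ^ (k' - 1) := pow_le_pow_right₀ (by norm_num) (by omega)
  have h2 : (10 : Int) ^ k ≤ 10 ^ k' := pow_le_pow_right₀ (by norm_num) h
  have p1 : (0 : Int) < 10 ^ (k - 1) := pow_pos (by norm_num) _
  have p2 : (0 : Int) < 10 ^ k := pow_pos (by norm_num) _
  nlinarith

lemma pvQ_lower (k' x : Nat) (hk : 1 ≤ k') (h1 : 10 ^ (k' - 1) ≤ x) :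
    (10 : Int) ^ (k' - 1) * (10 ^ k' + 1) ≤ (x : Int) * (10 ^ k' + 1) := by
  have h2 : ((10 : Int) ^ (k' - 1)) ≤ (x : Int) := by exact_mod_cast h1
  have p2 : (0 : Int) < 10 ^ k' + 1 := by positivity
  nlinarith

lemma pvSortedEq (l₁ l₂ : List Int) (h : ∀ a, a ∈ l₁ ↔ a ∈ l₂)
    (s₁ : l₁.Pairwise (· < ·)) (s₂ : l₂.Pairwise (· < ·)) : l₁ = l₂ := by
  have n₁ : l₁.Nodup := s₁.imp ne_of_lt
  have n₂ : l₂.Nodup := s₂.imp ne_of_lt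
  have hp : l₁.Perm l₂ := (List.perm_ext_iff_of_nodup n₁ n₂).mpr h
  exact hp.eq_of_pairwise (fun a b _ _ hab hba => absurd hba (not_lt.mpr hab.le)) s₁ s₂

-- pvP in terms of List.take on the digit string
lemma pvPb_iff' (n : Int) :
    pvPb n = true ↔ ((PySem.Int.toChars n).length % 2 = 0 ∧
      PySem.Int.toChars n =
        (PySem.Int.toChars n).take ((PySem.Int.toChars n).length / 2) ++
        (PySem.Int.toChars n).take ((PySem.Int.toChars n).length / 2)) := by
  unfold pvPb
  rw [decide_eq_true_iff]
  set cs := PySem.Int.toChars n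
  have hmod : PySem.Int.mod (cs.length : Int) 2 = ((cs.length % 2 : Nat) : Int) := by
    rw [PySem.Int.mod_eq_emod_of_pos (by norm_num)]
    push_cast
    rfl
  have hdiv : PySem.Int.floordiv (cs.length : Int) 2 = ((cs.length / 2 : Nat) : Int) := by
    rw [PySem.Int.floordiv_eq_ediv_of_pos (by norm_num)]
    push_cast
    rfl
  rw [hmod, hdiv, PySem.List.slice_to_natCast]
  simp
  exact fun _ => by omega

-- the Nat-side characterisation of the repeated-half test
lemma pvCheck_nat (m : Nat) :
    ((pvRep m).length % 2 = 0 ∧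
      pvRep m = (pvRep m).take ((pvRep m).length / 2) ++ (pvRep m).take ((pvRep m).length / 2)) ↔
    (∃ k x : Nat, 1 ≤ k ∧ 10 ^ (k - 1) ≤ x ∧ x < 10 ^ k ∧ m = x * (10 ^ k + 1)) := by
  constructor
  · rintro ⟨heven, heq⟩
    set L := (pvRep m).length with hL
    set h := L / 2 with hh
    have hLpos := pvRep_len_pos m
    have hL2 : L = 2 * h := by omega
    have hpos : 1 ≤ h := by omega
    have hm1 : 1 ≤ m := by
      by_contra hm
      have hm0 : m = 0 := by omega
      have : pvRep 0 = ['0'] := by rw [pvRep]; rfl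
      rw [hm0] at hL
      rw [this] at hL
      simp at hL
      omega
    set t := (pvRep m).take h with ht
    have htlen : t.length = h := by
      rw [ht, List.length_take]
      omega
    have hval : m = pvVal t * 10 ^ h + pvVal t := by
      conv_lhs => rw [← pvRep_val m]
      rw [heq, pvVal_append, htlen]
    set x := pvVal t with hx
    have hxlt : x < 10 ^ h := by
      have := pvVal_lt t (fun c hc => (pvRep_digits m c (List.take_subset _ _ hc)).2)
      rwa [htlen] at this
    have hbounds := pvRep_bounds m hm1
    rw [← hL] at hbounds
    have hxge : 10 ^ (h - 1) ≤ x := by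
      by_contra hcon
      have hAB : 10 ^ (L - 1) = 10 ^ (h - 1) * 10 ^ h := by
        rw [← pow_add]
        congr 1
        omega
      have h5 : x * 10 ^ h ≤ (10 ^ (h - 1) - 1) * 10 ^ h :=
        Nat.mul_le_mul_right _ (by omega)
      have h6 : (10 ^ (h - 1) - 1) * 10 ^ h = 10 ^ (h - 1) * 10 ^ h - 10 ^ h := by
        rw [Nat.sub_mul, one_mul]
      have h7 : (1:Nat) ≤ 10 ^ h := Nat.one_le_pow _ _ (by norm_num)
      have h8 : (1:Nat) ≤ 10 ^ (h-1) := Nat.one_le_pow _ _ (by norm_num)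
      have h9 : 10 ^ (h - 1) * 10 ^ h ≤ m := hAB ▸ hbounds.1
      have h10 : (10:Nat) ^ h ≤ 10 ^ (h-1) * 10 ^ h := Nat.le_mul_of_pos_left _ (by omega)
      omega
    exact ⟨h, x, hpos, hxge, hxlt, by rw [hval]; ring⟩
  · rintro ⟨k, x, hk, hx1, hx2, hm⟩
    have hx : 1 ≤ x := le_trans (Nat.one_le_pow _ _ (by norm_num)) hx1
    have hrep : pvRep m = pvRep x ++ pvRep x := by
      rw [hm, show x * (10 ^ k + 1) = x * 10 ^ k + x by ring]
      exact pvRep_concat k x x hx hk hx1 hx2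
    have hlen : (pvRep x).length = k := pvRep_len_eq x k hk hx1 hx2
    have hLL : (pvRep m).length = 2 * k := by
      rw [hrep, List.length_append, hlen]
      omega
    constructor
    · omega
    · have hdiv : (pvRep m).length / 2 = k := by omega
      rw [hdiv]
      conv_lhs => rw [hrep]
      conv_rhs => rw [hrep, ← hlen, List.take_left]

lemma pvNoDash (m : Nat) : '-' ∉ pvRep m := by
  intro hmem
  have h := pvRep_digits m '-' hmem
  have h45 : ('-').toNat = 45 := rfl
  omega

lemma pvPb_iff (n : Int) : pvPb n = true ↔ pvQ 1 n := by
  rw [pvPb_iff']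
  rcases le_or_gt 0 n with hn | hn
  · rw [pvToChars_nonneg n hn]
    rw [pvCheck_nat]
    unfold pvQ
    constructor
    · rintro ⟨k, x, hk, h1, h2, hm⟩
      exact ⟨k, x, hk, hk, h1, h2, by rw [← Int.toNat_of_nonneg hn, hm]; push_cast; ring⟩
    · rintro ⟨k, x, _, hk, h1, h2, hm⟩
      refine ⟨k, x, hk, h1, h2, ?_⟩
      have hcast : n = ((x * (10 ^ k + 1) : Nat) : Int) := by push_cast; exact hm
      rw [hcast, Int.toNat_natCast]
  · constructor
    · rintro ⟨heven, heq⟩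
      exfalso
      rw [pvToChars_neg n hn] at heven heq
      set cs := '-' :: pvRep n.natAbs with hcs
      have hLpos := pvRep_len_pos n.natAbs
      have hclen : cs.length = (pvRep n.natAbs).length + 1 := by simp [hcs]
      have hh : 1 ≤ cs.length / 2 := by
        rw [hclen] at heven ⊢
        omega
      have hcount1 : cs.count '-' = 1 := by
        rw [hcs]
        simp [List.count_cons]
        exact List.count_eq_zero.mpr (pvNoDash n.natAbs)
      have htake : cs.take (cs.length / 2) = '-' :: (pvRep n.natAbs).take (cs.length / 2 - 1) := by
        rw [hcs]
        rw [show cs.length / 2 = (cs.length / 2 - 1) + 1 by omega]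
        rfl
      have hcount2 : 1 ≤ (cs.take (cs.length / 2)).count '-' := by
        rw [htake]
        simp [List.count_cons]
      have : cs.count '-' = 2 * (cs.take (cs.length / 2)).count '-' := by
        conv_lhs => rw [heq]
        rw [List.count_append]
        omega
      omega
    · rintro ⟨k, x, _, hk, h1, h2, hm⟩
      exfalso
      have hx : 1 ≤ x := le_trans (Nat.one_le_pow _ _ (by norm_num)) h1
      have : (0:Int) < (x : Int) * (10 ^ k + 1) := by positivity
      omega

lemma pvGen_mem (first last n : Int) (k : Nat) :
    1 ≤ k → (n ∈ pvGenHalves first last k ↔ (first ≤ n ∧ n ≤ last ∧ pvQ k n)) := by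
  fun_induction pvGenHalves first last k with
  | case1 k m h =>
    intro hk
    have hgl : last < 10 ^ (k - 1) * ((10 : Int) ^ k + 1) := h
    simp only [List.not_mem_nil, false_iff]
    rintro ⟨hf, hl, k', x, hkk', hk', hx1, hx2, hn⟩
    have hlow := pvQ_lower k' x hk' hx1
    have hmono := pvMin_mono k k' hkk'
    have hnn : (10:Int) ^ (k-1) * (10 ^ k + 1) ≤ n := by rw [hn]; exact le_trans hmono hlow
    omega
  | case2 k m h lo hi ih =>
    intro hk
    have hm : (0:Int) < m := by positivity
    rw [List.mem_append, List.mem_map, ih (by omega)]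
    have hblock : (∃ x, x ∈ PySem.List.pyRange lo (hi + 1) 1 ∧ x * m = n) ↔
        (first ≤ n ∧ n ≤ last ∧ ∃ x : Nat, 10 ^ (k-1) ≤ x ∧ x < 10 ^ k ∧ n = (x:Int) * m) := by
      have e3 : ((10 ^ k : Nat) : Int) = (10:Int) ^ k := by push_cast; ring
      have e1 : ((10 ^ (k-1) : Nat) : Int) = (10:Int) ^ (k-1) := by push_cast; ring
      constructor
      · rintro ⟨x, hmem, rfl⟩
        rw [PySem.List.mem_pyRange_one] at hmem
        obtain ⟨hlo, hhi⟩ := hmem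
        have hx1 : (10:Int) ^ (k-1) ≤ x := le_trans (le_max_left _ _) hlo
        have hceil : -(PySem.Int.floordiv (-first) m) ≤ x := le_trans (le_max_right _ _) hlo
        have hfirst : first ≤ x * m := by
          have h4 : -x ≤ PySem.Int.floordiv (-first) m := by omega
          have h5 := (PySem.Int.le_floordiv_iff_mul_le hm).mp h4
          rw [neg_mul] at h5
          linarith
        have hhi2 : x ≤ hi := by omega
        have hx2 : x ≤ (10:Int) ^ k - 1 := le_trans hhi2 (min_le_left _ _)
        have hlast : x * m ≤ last := by
          have hxle : x ≤ PySem.Int.floordiv last m := le_trans hhi2 (min_le_right _ _)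
          by_contra hcon
          have h6 := (PySem.Int.floordiv_lt_iff_lt_mul hm).mpr (by linarith : last < x * m)
          omega
        have hxpos : (0:Int) < x := lt_of_lt_of_le (pow_pos (by norm_num) _) hx1
        have e2 : (x.toNat : Int) = x := Int.toNat_of_nonneg hxpos.le
        refine ⟨hfirst, hlast, x.toNat, by omega, by omega, by rw [e2]⟩
      · rintro ⟨hf, hl, x, hx1, hx2, rfl⟩
        refine ⟨(x : Int), ?_, rfl⟩
        rw [PySem.List.mem_pyRange_one]
        have hx1i : (10:Int) ^ (k-1) ≤ (x:Int) := by omega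
        have hx2i : (x:Int) < (10:Int) ^ k := by omega
        constructor
        · refine max_le hx1i ?_
          have hq : (-(x:Int)) * m ≤ -first := by rw [neg_mul]; linarith
          have h7 := (PySem.Int.le_floordiv_iff_mul_le hm).mpr hq
          omega
        · have hxle : (x:Int) ≤ PySem.Int.floordiv last m := by
            by_contra hcon
            have h8 := (PySem.Int.floordiv_lt_iff_lt_mul (a := last) (q := ((x:Nat):Int)) hm).mp (by omega)
            linarith
          have h9 := le_min (by omega : (x:Int) ≤ 10 ^ k - 1) hxle
          omega
    rw [hblock]
    constructor
    · rintro (⟨hf, hl, x, h1, h2, h3⟩ | ⟨hf, hl, k', x, hkk', hk', h1, h2, h3⟩)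
      · exact ⟨hf, hl, k, x, le_rfl, hk, h1, h2, h3⟩
      · exact ⟨hf, hl, k', x, by omega, hk', h1, h2, h3⟩
    · rintro ⟨hf, hl, k', x, hkk', hk', h1, h2, h3⟩
      rcases eq_or_lt_of_le hkk' with rfl | hlt
      · left; exact ⟨hf, hl, x, h1, h2, h3⟩
      · right; exact ⟨hf, hl, k', x, by omega, hk', h1, h2, h3⟩

lemma pvGen_pairwise (first last : Int) (k : Nat) :
    (pvGenHalves first last k).Pairwise (· < ·) := by
  fun_induction pvGenHalves first last k with
  | case1 k m h => exact List.Pairwise.nil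
  | case2 k m h lo hi ih =>
    have hm : (0:Int) < m := by positivity
    rw [List.pairwise_append]
    refine ⟨?_, ih, ?_⟩
    · exact (PySem.List.pairwise_lt_pyRange_one lo (hi + 1)).map _
        (fun a b hab => mul_lt_mul_of_pos_right hab hm)
    · intro a ha b hb
      rw [List.mem_map] at ha
      obtain ⟨x, hxmem, rfl⟩ := ha
      rw [PySem.List.mem_pyRange_one] at hxmem
      have hxhi : x ≤ hi := by have h2 := hxmem.2; omega
      have hx2 : x ≤ (10:Int) ^ k - 1 := le_trans hxhi (min_le_left _ _)
      have hxpos : (0:Int) ≤ x := le_trans (by positivity) (le_trans (le_max_left _ _) hxmem.1)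
      have ha_le : x * m ≤ ((10:Int) ^ k - 1) * (10 ^ k + 1) := by nlinarith
      have hb' := (pvGen_mem first last b (k+1) (by omega)).mp hb
      obtain ⟨-, -, k', x', hkk', hk', hx1', hx2', rfl⟩ := hb'
      have hlow := pvQ_lower k' x' hk' hx1'
      have hmono := pvMin_mono (k+1) k' hkk'
      have hpow : (0:Int) < 10 ^ k := by positivity
      have hstep : ((10:Int) ^ k - 1) * (10 ^ k + 1) < 10 ^ (k + 1 - 1) * (10 ^ (k+1) + 1) := by
        have hs : (10:Int) ^ (k+1) = 10 ^ k * 10 := by rw [pow_succ]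
        simp only [Nat.add_sub_cancel]
        nlinarith
      calc x * m ≤ ((10:Int) ^ k - 1) * (10 ^ k + 1) := ha_le
        _ < 10 ^ (k + 1 - 1) * (10 ^ (k+1) + 1) := hstep
        _ ≤ 10 ^ (k' - 1) * (10 ^ k' + 1) := hmono
        _ ≤ (x' : Int) * (10 ^ k' + 1) := hlow

lemma pvA_eq_filter (first last : Int) :
    invalid_ids_1 (first, last) =
      (PySem.List.pyRange first (last + 1) 1).filter pvPb := by
  unfold invalid_ids_1
  have hbody : (fun (invalid_ids : List Int) (id : Int) =>
      let idStr : List Char := PySem.Int.toChars id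
      if PySem.Int.mod (idStr.length : Int) 2 ≠ 0 then invalid_ids
      else
        let sub_id := PySem.List.slice idStr none
          (some (PySem.Int.floordiv (idStr.length : Int) 2))
        if idStr = sub_id ++ sub_id then invalid_ids ++ [id]
        else invalid_ids) =
      (fun acc x => if pvPb x = true then acc ++ [(fun (y : Int) => y) x] else acc) := by
    funext acc id
    simp only [pvPb, decide_eq_true_iff]
    by_cases h1 : PySem.Int.mod (((PySem.Int.toChars id).length : Nat) : Int) 2 ≠ 0
    · rw [if_pos h1]
      rw [if_neg]
      exact fun hc => absurd h1 (by simpa using hc.1)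
    · rw [if_neg h1]
      by_cases h2 : PySem.Int.toChars id =
          PySem.List.slice (PySem.Int.toChars id) none
            (some (PySem.Int.floordiv ((PySem.Int.toChars id).length : Int) 2)) ++
          PySem.List.slice (PySem.Int.toChars id) none
            (some (PySem.Int.floordiv ((PySem.Int.toChars id).length : Int) 2))
      · rw [if_pos h2, if_pos]
        exact ⟨h1, h2⟩
      · rw [if_neg h2, if_neg]
        exact fun hc => absurd hc.2 h2
  rw [hbody, PySem.List.foldl_append_if]
  simp

-- ===== VERDICT (by name: the statement is the Claim_ definition above) =====
theorem invalid_ids_1_spec : Claim_equal_invalid_ids_1 := by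
  intro rb _
  unfold Spec_invalid_ids_1
  obtain ⟨first, last⟩ := rb
  show invalid_ids_1 (first, last) = invalid_ids_1_alt (first, last)
  rw [pvA_eq_filter]
  show _ = pvGenHalves first last 1
  refine pvSortedEq _ _ (fun a => ?_) ?_ ?_
  · rw [List.mem_filter, pvGen_mem first last a 1 le_rfl, PySem.List.mem_pyRange_one, pvPb_iff]
    constructor
    · rintro ⟨⟨h1, h2⟩, h3⟩; exact ⟨h1, by omega, h3⟩
    · rintro ⟨h1, h2, h3⟩; exact ⟨⟨h1, by omega⟩, h3⟩
  · exact (PySem.List.pairwise_lt_pyRange_one first (last + 1)).filter _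
  · exact pvGen_pairwise first last 1
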